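-- pv_equiv track=rewrite | github.com/Wvidit/Synnapse | context/contextbench.py | policy_a_naive
-- ===== SOURCE A (Python) =====
-- from typing import List
--
-- def policy_a_naive(
--     new_observation: str,
--     history: List[str],
--     max_tokens: int = 8192,
--     query: str = "",
-- ) -> List[str]:
--     """
--     Append everything to context. When the token budget is exceeded,
--     pop the oldest entries (FIFO).
--     """
--     history.append(new_observation)
--
--     while _count_tokens(history) > max_tokens and len(history) > 1:
--         history.pop(0)
--
--     return history
--
-- def _count_tokens(entries: List[str]) -> int:
--     """Approximate token count from word count."""
--     return len(" ".join(entries).split())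
-- ===== SOURCE B (Python) =====
-- def policy_a_naive(new_observation, history, max_tokens=8192, query=""):
--     """Same FIFO trim, O(n): per-entry word counts + running total instead of
--     re-joining and re-splitting the whole history each iteration.
--     Mutates `history` in place exactly like the original (append, then drop oldest)."""
--     history.append(new_observation)
--     counts = [len(e.split()) for e in history]
--     total = sum(counts)
--     i = 0
--     while total > max_tokens and i < len(history) - 1:
--         total -= counts[i]
--         i += 1
--     del history[:i]
--     return history
-- ===== Notes on version B (the rewrite author's own statement) =====
-- stated objective: faster
-- what changed: B precomputes per-entry word counts once and finds the number of oldest entries to drop in a single pass over a running total, instead of re-joining and re-splitting the entire history on every pop.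
import Mathlib
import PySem

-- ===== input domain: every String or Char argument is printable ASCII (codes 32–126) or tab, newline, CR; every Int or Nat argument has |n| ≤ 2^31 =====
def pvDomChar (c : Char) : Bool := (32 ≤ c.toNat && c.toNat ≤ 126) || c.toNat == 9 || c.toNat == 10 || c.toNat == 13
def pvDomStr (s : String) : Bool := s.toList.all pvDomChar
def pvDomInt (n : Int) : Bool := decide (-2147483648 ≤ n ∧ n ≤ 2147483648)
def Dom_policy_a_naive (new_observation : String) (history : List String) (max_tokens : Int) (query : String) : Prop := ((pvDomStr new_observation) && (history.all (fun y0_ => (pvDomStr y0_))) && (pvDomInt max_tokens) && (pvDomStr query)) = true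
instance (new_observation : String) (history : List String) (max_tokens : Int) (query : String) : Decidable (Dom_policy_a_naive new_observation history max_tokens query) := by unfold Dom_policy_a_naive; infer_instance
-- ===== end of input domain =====

-- B trims the same FIFO history in one pass over precomputed per-entry word counts instead of
-- re-joining and re-splitting the whole history on every pop (objective: faster).
-- Both A and B mutate `history` in place identically (append, then remove the oldest entries);
-- the equivalence proved here is about the return value.

-- ===== PORT A =====
-- _count_tokens(entries) = len(" ".join(entries).split())
def pvCountTokens (entries : List String) : Int :=
  ((PySem.Str.split₀ (PySem.Str.join " " entries)).length : Int)

-- the while loop: pop the oldest entry while over budget and more than one entry remains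
def pvLoopA (h : List String) (m : Int) : List String :=
  if pvCountTokens h > m ∧ h.length > 1 then pvLoopA (h.drop 1) m else h
termination_by h.length
decreasing_by simp_all; omega

def policy_a_naive (new_observation : String) (history : List String) (max_tokens : Int) (query : String) : List String :=
  pvLoopA (history ++ [new_observation]) max_tokens

-- ===== PORT B =====
-- len(e.split())
def pvWc (e : String) : Int := ((PySem.Str.split₀ e).length : Int)

-- the while loop of B: how many oldest entries to drop, walking the counts once
def pvDropCount (counts : List Int) (total m : Int) : Nat :=
  match counts with
  | [] => 0
  | [_] => 0
  | c :: rest => if total > m then 1 + pvDropCount rest (total - c) m else 0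

def policy_a_naive_alt (new_observation : String) (history : List String) (max_tokens : Int) (query : String) : List String :=
  let h := history ++ [new_observation]
  let counts := h.map pvWc
  h.drop (pvDropCount counts counts.sum max_tokens)

-- ===== PRECONDITION & SPEC =====
def Spec_policy_a_naive (new_observation : String) (history : List String) (max_tokens : Int) (query : String) (out : List String) : Prop := out = policy_a_naive_alt new_observation history max_tokens query
instance (new_observation : String) (history : List String) (max_tokens : Int) (query : String) (out : List String) : Decidable (Spec_policy_a_naive new_observation history max_tokens query out) := by unfold Spec_policy_a_naive; infer_instance

-- ===== CLAIM (what is proved, stated in full; the proofs are below) =====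
def Claim_equal_policy_a_naive : Prop := ∀ (new_observation : String) (history : List String) (max_tokens : Int) (query : String), Dom_policy_a_naive new_observation history max_tokens query → Spec_policy_a_naive new_observation history max_tokens query (policy_a_naive new_observation history max_tokens query)

-- ===== LEMMAS AND PROOFS =====

-- split₀.go with a non-empty accumulator just prepends the reversed accumulator
theorem pv_go_acc (s : List Char) : ∀ cur acc,
    PySem.Chars.split₀.go s cur acc = acc.reverse ++ PySem.Chars.split₀.go s cur [] := by
  induction s with
  | nil =>
    intro cur acc
    simp [PySem.Chars.split₀.go]
    split <;> simp
  | cons c rest ih =>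
    intro cur acc
    simp only [PySem.Chars.split₀.go]
    split
    · split
      · exact ih [] acc
      · rw [ih [] (cur.reverse :: acc), ih [] [cur.reverse]]
        simp
    · exact ih (c :: cur) acc

-- splitting across a space concatenates the word lists
theorem pv_go_space (a : List Char) (b : List Char) : ∀ cur acc,
    PySem.Chars.split₀.go (a ++ ' ' :: b) cur acc
      = PySem.Chars.split₀.go a cur acc ++ PySem.Chars.split₀.go b [] [] := by
  induction a with
  | nil =>
    intro cur acc
    have hsp : PySem.Chars.isspace ' ' = true := by decide
    simp only [List.nil_append, PySem.Chars.split₀.go, hsp, if_true]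
    by_cases hcur : cur.isEmpty
    · rw [if_pos hcur, pv_go_acc b [] acc]
      simp [hcur]
    · rw [if_neg hcur, pv_go_acc b [] (cur.reverse :: acc)]
      simp [hcur]
  | cons c rest ih =>
    intro cur acc
    simp only [List.cons_append, PySem.Chars.split₀.go]
    split
    · split
      · exact ih [] acc
      · exact ih [] _
    · exact ih (c :: cur) acc

theorem pv_split_append_space (a b : List Char) :
    PySem.Chars.split₀ (a ++ ' ' :: b) = PySem.Chars.split₀ a ++ PySem.Chars.split₀ b := by
  simpa [PySem.Chars.split₀] using pv_go_space a b [] []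

-- the join-then-split word count is the sum of per-entry word counts
theorem pv_count_eq_sum (entries : List String) :
    pvCountTokens entries = (entries.map pvWc).sum := by
  induction entries with
  | nil => simp [pvCountTokens, PySem.Str.split₀, PySem.Str.join, PySem.Chars.join, PySem.Chars.split₀]
  | cons e rest ih =>
    cases rest with
    | nil =>
      simp [pvCountTokens, pvWc, PySem.Str.split₀, PySem.Str.join, PySem.Chars.join, List.intercalate]
    | cons f rest' =>
      have hjoin : (PySem.Str.join " " (e :: f :: rest')).toList
          = e.toList ++ ' ' :: (PySem.Str.join " " (f :: rest')).toList := by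
        simp [PySem.Str.join, PySem.Chars.join, List.intercalate]
      have h1 : pvCountTokens (e :: f :: rest')
          = pvWc e + pvCountTokens (f :: rest') := by
        simp only [pvCountTokens, pvWc, PySem.Str.split₀, List.length_map]
        rw [hjoin, pv_split_append_space]
        push_cast [List.length_append]
        ring
      rw [h1, ih]
      simp

-- main loop equivalence
theorem pv_loop_eq (h : List String) (m : Int) :
    pvLoopA h m = h.drop (pvDropCount (h.map pvWc) (h.map pvWc).sum m) := by
  induction h using pvLoopA.induct m with
  | case1 h hcond ih =>
    obtain ⟨hgt, hlen⟩ := hcond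
    rw [pvLoopA, if_pos ⟨hgt, hlen⟩, ih]
    match h, hgt, hlen with
    | a :: b :: t, hgt, _ =>
      have hc := pv_count_eq_sum (a :: b :: t)
      simp only [List.map_cons, List.sum_cons] at hc
      have hgt2 : pvWc a + (pvWc b + (List.map pvWc t).sum) > m := by
        rw [hc] at hgt; exact hgt
      simp only [List.drop_one, List.tail_cons, List.map_cons, List.sum_cons, pvDropCount,
        if_pos hgt2]
      have harg : pvWc a + (pvWc b + (List.map pvWc t).sum) - pvWc a
          = pvWc b + (List.map pvWc t).sum := by ring
      rw [harg, Nat.add_comm 1, List.drop_succ_cons]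
  | case2 h hcond =>
    rw [pvLoopA]
    rw [if_neg hcond]
    cases h with
    | nil => simp [pvDropCount]
    | cons a t' =>
      cases t' with
      | nil => simp [pvDropCount]
      | cons b t =>
        have hle : ¬ pvCountTokens (a :: b :: t) > m := by
          intro hx
          exact hcond ⟨hx, by simp⟩
        have hc := pv_count_eq_sum (a :: b :: t)
        rw [hc] at hle
        simp only [List.map_cons, List.sum_cons] at hle
        simp only [List.map_cons, List.sum_cons, pvDropCount, if_neg hle, List.drop_zero]

-- ===== VERDICT (by name: the statement is the Claim_ definition above) =====
theorem policy_a_naive_spec : Claim_equal_policy_a_naive := by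
  intro no h m q _
  unfold Spec_policy_a_naive policy_a_naive policy_a_naive_alt
  exact pv_loop_eq (h ++ [no]) m
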